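-- pv_equiv track=rewrite | github.com/jjaen0823/codingTest | programmers/L2_86971_전력망둘로나누기.py | bfs
-- ===== SOURCE A (Python) =====
-- from collections import deque
--
-- def bfs(graph, v1, v2):
--     need_visit = deque([v1])
--     visited, v_count = set(), 0
--
--     while need_visit:
--         v = need_visit.popleft()
--         # 아직 방문하지 않은 송전탑인 경우
--         if v not in visited:
--             # v1 : {v2}, v2: {v1} 은 끊어졌기 때문에 v1->v2 이동 X
--             if v == v1:
--                 for check_v in graph[v]:
--                     if check_v != v2: need_visit.append(check_v)
--             else:
--                 need_visit.extend(graph[v])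
--             v_count += 1
--             visited.add(v)
--
--     return v_count
-- ===== SOURCE B (Python) =====
-- def bfs(graph, v1, v2):
--     # Recursive DFS over the graph with the v1->v2 edge cut; counts the
--     # vertices of v1's component (same count as the original BFS).
--     visited = set()
--
--     def visit(v):
--         if v in visited:
--             return 0
--         visited.add(v)
--         count = 1
--         for w in graph[v]:
--             if v != v1 or w != v2:
--                 count += visit(w)
--         return count
--
--     return visit(v1)
-- ===== Notes on version B (the rewrite author's own statement) =====
-- stated objective: alternative
-- what changed: Replaces the iterative deque-based BFS (which enqueues duplicates and re-checks visited on pop) by a recursive DFS with an entry visited-guard that never expands a vertex twice; same component count because reachability is traversal-order independent.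
import Mathlib
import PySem

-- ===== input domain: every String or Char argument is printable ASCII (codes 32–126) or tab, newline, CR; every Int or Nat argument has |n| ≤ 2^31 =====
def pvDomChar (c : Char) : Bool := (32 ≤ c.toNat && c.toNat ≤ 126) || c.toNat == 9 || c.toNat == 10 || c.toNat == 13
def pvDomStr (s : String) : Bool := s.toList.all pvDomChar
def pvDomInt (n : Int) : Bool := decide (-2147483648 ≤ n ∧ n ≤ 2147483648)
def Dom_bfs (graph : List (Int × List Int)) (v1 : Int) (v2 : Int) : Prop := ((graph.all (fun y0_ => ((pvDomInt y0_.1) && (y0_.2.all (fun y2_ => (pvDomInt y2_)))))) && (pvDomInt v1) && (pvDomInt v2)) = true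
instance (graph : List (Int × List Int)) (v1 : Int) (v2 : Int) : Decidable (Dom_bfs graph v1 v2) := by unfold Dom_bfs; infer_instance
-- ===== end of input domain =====

-- B replaces the deque-based iterative BFS by a recursive DFS with an entry visited-guard;
-- the component count is the same because reachability is traversal-order independent.


-- ===== PORT A =====
-- termination helper for the BFS loop: visiting a fresh key shrinks the unvisited-key count
theorem pvFilterLt (keys vis : List Int) (v : Int) (hk : v ∈ keys) (hv : v ∉ vis) :
    ((keys.filter (fun k => !(vis ++ [v]).contains k)).length)
      < ((keys.filter (fun k => !vis.contains k)).length) := by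
  have hp : keys.filter (fun k => !(vis ++ [v]).contains k)
      = (keys.filter (fun k => !vis.contains k)).filter (fun k => !(k == v)) := by
    rw [List.filter_filter]
    apply List.filter_congr
    intro k _
    by_cases h1 : k ∈ vis <;> by_cases h2 : k = v <;> simp [List.contains_eq_mem, h1, h2]
  rw [hp]
  apply List.length_filter_lt_length_iff_exists.mpr
  exact ⟨v, List.mem_filter.mpr ⟨hk, by simp [List.contains_eq_mem, hv]⟩, by simp⟩

-- the while-loop of A: queue, visited set, counter
def bfsLoop (graph : List (Int × List Int)) (v1 : Int) (v2 : Int)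
    (q : List Int) (visited : PySem.Set Int) (count : Int) : Int :=
  match q with
  | [] => count
  | v :: rest =>
    if hv : v ∈ visited then
      bfsLoop graph v1 v2 rest visited count
    else
      match h : (PySem.Dict.mk graph).get? v with
      | none => count   -- Python raises KeyError here (excluded by Pre_bfs)
      | some ns =>
        bfsLoop graph v1 v2
          (if v = v1 then rest ++ ns.filter (fun w => w ≠ v2) else rest ++ ns)
          (PySem.Set.add visited v) (count + 1)
termination_by (((graph.map Prod.fst).filter (fun k => !visited.contains k)).length, q.length)
decreasing_by
  · apply Prod.Lex.right
    simp
  · apply Prod.Lex.left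
    have hk : v ∈ graph.map Prod.fst := by
      by_contra hnk
      rw [(PySem.Dict.get?_eq_none_iff_not_mem_keys _ _).mpr (by simpa using hnk)] at h
      exact absurd h (by simp)
    rw [PySem.Set.add_of_not_mem hv]
    simpa using pvFilterLt (graph.map Prod.fst) visited v hk hv

def bfs (graph : List (Int × List Int)) (v1 : Int) (v2 : Int) : Int :=
  bfsLoop graph v1 v2 [v1] PySem.Set.empty 0

-- ===== PORT B =====
mutual
-- visit(v): entry guard, mark v, then recurse over graph[v] skipping the cut edge v1->v2
def dfsVisit (graph : List (Int × List Int)) (v1 : Int) (v2 : Int) :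
    Nat → Int → PySem.Set Int → (PySem.Set Int × Int)
  | 0, _, visited => (visited, 0)   -- fuel guard only; never reached from bfs_alt's initial fuel
  | Nat.succ fuel, v, visited =>
    if visited.contains v then (visited, 0)
    else
      let visited' := PySem.Set.add visited v
      match (PySem.Dict.mk graph).get? v with
      | none => (visited', 1)   -- Python raises KeyError here (excluded by Pre_bfs)
      | some ns => dfsList graph v1 v2 fuel v ns visited' 1
termination_by fuel v visited => (fuel, 0)
decreasing_by
  apply Prod.Lex.left; omega

-- the for-loop inside visit
def dfsList (graph : List (Int × List Int)) (v1 : Int) (v2 : Int) :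
    Nat → Int → List Int → PySem.Set Int → Int → (PySem.Set Int × Int)
  | _, _, [], visited, count => (visited, count)
  | fuel, v, w :: ws, visited, count =>
    if v ≠ v1 ∨ w ≠ v2 then
      let r := dfsVisit graph v1 v2 fuel w visited
      dfsList graph v1 v2 fuel v ws r.1 (count + r.2)
    else
      dfsList graph v1 v2 fuel v ws visited count
termination_by fuel v ns visited count => (fuel, ns.length + 1)
decreasing_by
  · apply Prod.Lex.right; omega
  · apply Prod.Lex.right; simp [List.length_cons]
  · apply Prod.Lex.right; simp [List.length_cons]
end

def bfs_alt (graph : List (Int × List Int)) (v1 : Int) (v2 : Int) : Int :=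
  (dfsVisit graph v1 v2 (graph.length + 2) v1 PySem.Set.empty).2

-- ===== PRECONDITION & SPEC =====
-- the successor list of a vertex in the cut graph (what both ports append / iterate)
def pvSucc (graph : List (Int × List Int)) (v1 : Int) (v2 : Int) (u : Int) : List Int :=
  match (PySem.Dict.mk graph).get? u with
  | none => []
  | some ns => if u = v1 then ns.filter (fun w => w ≠ v2) else ns

-- Pre_bfs: some successor-closed subset of the keys contains v1, i.e. v1's component stays
-- inside the dict's keys — exactly the inputs on which A's graph[v] lookups never raise KeyError.
def Pre_bfs (graph : List (Int × List Int)) (v1 : Int) (v2 : Int) : Prop :=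
  ∃ S ∈ (graph.map Prod.fst).sublists, v1 ∈ S ∧ ∀ x ∈ S, ∀ w ∈ pvSucc graph v1 v2 x, w ∈ S
instance (graph : List (Int × List Int)) (v1 : Int) (v2 : Int) : Decidable (Pre_bfs graph v1 v2) := by unfold Pre_bfs; infer_instance

def pvWitness_bfs : (List (Int × List Int)) × Int × Int := ([(1, [2]), (2, [1, 3]), (3, [2])], 1, 2)

def Spec_bfs (graph : List (Int × List Int)) (v1 : Int) (v2 : Int) (out : Int) : Prop := out = bfs_alt graph v1 v2
instance (graph : List (Int × List Int)) (v1 : Int) (v2 : Int) (out : Int) : Decidable (Spec_bfs graph v1 v2 out) := by unfold Spec_bfs; infer_instance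

-- ===== CLAIM (what is proved, stated in full; the proofs are below) =====
def Claim_equal_bfs : Prop := ∀ (graph : List (Int × List Int)) (v1 : Int) (v2 : Int), Dom_bfs graph v1 v2 → Pre_bfs graph v1 v2 → Spec_bfs graph v1 v2 (bfs graph v1 v2)

-- ===== LEMMAS AND PROOFS =====

-- reachability from v1 in the cut graph
def pvReach (graph : List (Int × List Int)) (v1 : Int) (v2 : Int) : Int → Prop :=
  Relation.ReflTransGen (fun a b => b ∈ pvSucc graph v1 v2 a) v1

theorem pvMemKeysGet (graph : List (Int × List Int)) (v : Int)
    (h : v ∈ graph.map Prod.fst) : ∃ ns, (PySem.Dict.mk graph).get? v = some ns := by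
  cases hg : (PySem.Dict.mk graph).get? v with
  | none =>
    exact absurd (by simpa using (PySem.Dict.get?_eq_none_iff_not_mem_keys _ _).mp hg) (by simpa using h)
  | some ns => exact ⟨ns, rfl⟩

theorem pvReachKeys (graph : List (Int × List Int)) (v1 v2 : Int)
    (hpre : Pre_bfs graph v1 v2) (x : Int) (hx : pvReach graph v1 v2 x) :
    x ∈ graph.map Prod.fst := by
  obtain ⟨S, hS, hv1, hcl⟩ := hpre
  have hmem : x ∈ S := by
    clear hS
    induction hx with
    | refl => exact hv1
    | tail _ hstep ih => exact hcl _ ih _ hstep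
  exact (List.mem_sublists.mp hS).subset hmem

theorem pvReachClosed (graph : List (Int × List Int)) (v1 v2 : Int) (S : List Int)
    (h1 : v1 ∈ S) (h2 : ∀ x ∈ S, ∀ w ∈ pvSucc graph v1 v2 x, w ∈ S)
    (x : Int) (hx : pvReach graph v1 v2 x) : x ∈ S := by
  induction hx with
  | refl => exact h1
  | tail _ hstep ih => exact h2 _ ih _ hstep

theorem pvMemSuccIff (graph : List (Int × List Int)) (v1 v2 v : Int) (ns : List Int)
    (h : (PySem.Dict.mk graph).get? v = some ns) (w : Int) :
    w ∈ pvSucc graph v1 v2 v ↔ w ∈ ns ∧ (v ≠ v1 ∨ w ≠ v2) := by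
  unfold pvSucc
  rw [h]
  by_cases hv : v = v1 <;> simp [hv]

theorem pvFilterLe (keys vis r1 : List Int) (h : ∀ x ∈ vis, x ∈ r1) :
    (keys.filter (fun k => !r1.contains k)).length
      ≤ (keys.filter (fun k => !vis.contains k)).length := by
  rw [← List.countP_eq_length_filter, ← List.countP_eq_length_filter]
  apply List.countP_mono_left
  intro a _ ha
  simp [List.contains_eq_mem] at ha ⊢
  exact fun hm => ha (h a hm)

theorem pvLenEq (l1 l2 : List Int) (h1 : l1.Nodup) (h2 : l2.Nodup)
    (h : ∀ x, x ∈ l1 ↔ x ∈ l2) : l1.length = l2.length :=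
  ((List.perm_ext_iff_of_nodup h1 h2).mpr h).length_eq

-- properties shared by the new visited set after a (partial) traversal step
def pvGrow (graph : List (Int × List Int)) (v1 v2 : Int) (vis r1 : List Int) : Prop :=
  (∀ x ∈ vis, x ∈ r1) ∧ (∀ x ∈ r1, pvReach graph v1 v2 x) ∧
  (∀ x ∈ r1, x ∉ vis → ∀ w ∈ pvSucc graph v1 v2 x, w ∈ r1) ∧ r1.Nodup

-- the invariant proof for A's BFS loop: the result is the size of the reachable set
theorem bfsLoop_reach (graph : List (Int × List Int)) (v1 v2 : Int)
    (hpre : Pre_bfs graph v1 v2) :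
    ∀ (q : List Int) (vis : PySem.Set Int) (cnt : Int),
    vis.Nodup →
    (∀ x ∈ q, pvReach graph v1 v2 x) →
    (∀ x ∈ vis, pvReach graph v1 v2 x) →
    (∀ x ∈ vis, ∀ w ∈ pvSucc graph v1 v2 x, w ∈ vis ∨ w ∈ q) →
    (v1 ∈ vis ∨ v1 ∈ q) →
    cnt = (vis.length : Int) →
    ∃ V : List Int, bfsLoop graph v1 v2 q vis cnt = (V.length : Int) ∧ V.Nodup ∧
      (∀ x, x ∈ V ↔ pvReach graph v1 v2 x) := by
  intro q vis cnt
  induction q, vis, cnt using bfsLoop.induct graph v1 v2 with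
  | case1 vis cnt =>
    intro hnd hq hvis hcl hst hcnt
    refine ⟨vis, by rw [hcnt]; simp [bfsLoop], hnd, fun x => ⟨hvis x, ?_⟩⟩
    intro hx
    refine pvReachClosed graph v1 v2 vis ?_ ?_ x hx
    · rcases hst with h | h
      · exact h
      · simp at h
    · intro y hy w hw
      rcases hcl y hy w hw with h | h
      · exact h
      · simp at h
  | case2 vis cnt v rest hv ih =>
    intro hnd hq hvis hcl hst hcnt
    rw [show bfsLoop graph v1 v2 (v :: rest) vis cnt = bfsLoop graph v1 v2 rest vis cnt by
      simp [bfsLoop, hv]]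
    refine ih hnd (fun x hx => hq x (List.mem_cons_of_mem _ hx)) hvis ?_ ?_ hcnt
    · intro x hx w hw
      rcases hcl x hx w hw with h | h
      · exact Or.inl h
      · rcases List.mem_cons.mp h with rfl | h'
        · exact Or.inl hv
        · exact Or.inr h'
    · rcases hst with h | h
      · exact Or.inl h
      · rcases List.mem_cons.mp h with rfl | h'
        · exact Or.inl hv
        · exact Or.inr h'
  | case3 vis cnt v rest hv hnone =>
    intro hnd hq hvis hcl hst hcnt
    exfalso
    obtain ⟨ns, hns⟩ := pvMemKeysGet graph v
      (pvReachKeys graph v1 v2 hpre v (hq v List.mem_cons_self))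
    rw [hns] at hnone
    exact absurd hnone (by simp)
  | case4 vis cnt v rest hv ns hsome ih =>
    intro hnd hq hvis hcl hst hcnt
    have hreachv : pvReach graph v1 v2 v := hq v List.mem_cons_self
    have hsucc : pvSucc graph v1 v2 v
        = (if v = v1 then ns.filter (fun w => w ≠ v2) else ns) := by
      unfold pvSucc; rw [hsome]
    have hstep : bfsLoop graph v1 v2 (v :: rest) vis cnt
        = bfsLoop graph v1 v2 (if v = v1 then rest ++ ns.filter (fun w => w ≠ v2) else rest ++ ns)
            (PySem.Set.add vis v) (cnt + 1) := by
      conv_lhs => rw [bfsLoop]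
      rw [dif_neg hv, hsome]
    simp only [dite_eq_ite] at ih
    rw [hstep]
    have hqeq : (if v = v1 then rest ++ ns.filter (fun w => w ≠ v2) else rest ++ ns)
        = rest ++ pvSucc graph v1 v2 v := by
      rw [hsucc]; by_cases hvv : v = v1 <;> simp [hvv]
    rw [hqeq] at ih ⊢
    refine ih (PySem.Set.nodup_add vis v hnd) ?_ ?_ ?_ ?_ ?_
    · intro x hx
      rcases List.mem_append.mp hx with h | h
      · exact hq x (List.mem_cons_of_mem _ h)
      · exact hreachv.tail h
    · intro x hx
      rcases (PySem.Set.mem_add _ _ _).mp hx with h | rfl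
      · exact hvis x h
      · exact hreachv
    · intro x hx w hw
      rcases (PySem.Set.mem_add _ _ _).mp hx with h | rfl
      · rcases hcl x h w hw with h' | h'
        · exact Or.inl ((PySem.Set.mem_add _ _ _).mpr (Or.inl h'))
        · rcases List.mem_cons.mp h' with rfl | h''
          · exact Or.inl ((PySem.Set.mem_add _ _ _).mpr (Or.inr rfl))
          · exact Or.inr (List.mem_append.mpr (Or.inl h''))
      · exact Or.inr (List.mem_append.mpr (Or.inr hw))
    · rcases hst with h | h
      · exact Or.inl ((PySem.Set.mem_add _ _ _).mpr (Or.inl h))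
      · rcases List.mem_cons.mp h with rfl | h'
        · exact Or.inl ((PySem.Set.mem_add _ _ _).mpr (Or.inr rfl))
        · exact Or.inr (List.mem_append.mpr (Or.inl h'))
    · rw [PySem.Set.add_of_not_mem hv]
      simp [hcnt]

-- the invariant proof for B's DFS: a completed visit closes the visited set under successors
theorem dfs_spec (graph : List (Int × List Int)) (v1 v2 : Int)
    (hpre : Pre_bfs graph v1 v2) : ∀ fuel : Nat,
    (∀ (v : Int) (vis : PySem.Set Int),
      ((graph.map Prod.fst).filter (fun k => !vis.contains k)).length < fuel →
      vis.Nodup → (∀ x ∈ vis, pvReach graph v1 v2 x) → pvReach graph v1 v2 v →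
      pvGrow graph v1 v2 vis (dfsVisit graph v1 v2 fuel v vis).1 ∧
      v ∈ (dfsVisit graph v1 v2 fuel v vis).1 ∧
      (dfsVisit graph v1 v2 fuel v vis).2
        = ((dfsVisit graph v1 v2 fuel v vis).1.length : Int) - (vis.length : Int)) ∧
    (∀ (v : Int) (ns : List Int) (vis : PySem.Set Int) (cnt : Int),
      ((graph.map Prod.fst).filter (fun k => !vis.contains k)).length < fuel →
      vis.Nodup → (∀ x ∈ vis, pvReach graph v1 v2 x) →
      (∀ w ∈ ns, (v ≠ v1 ∨ w ≠ v2) → pvReach graph v1 v2 w) →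
      pvGrow graph v1 v2 vis (dfsList graph v1 v2 fuel v ns vis cnt).1 ∧
      (∀ w ∈ ns, (v ≠ v1 ∨ w ≠ v2) → w ∈ (dfsList graph v1 v2 fuel v ns vis cnt).1) ∧
      (dfsList graph v1 v2 fuel v ns vis cnt).2
        = cnt + (((dfsList graph v1 v2 fuel v ns vis cnt).1.length : Int) - (vis.length : Int))) := by
  intro fuel
  induction fuel with
  | zero =>
    constructor
    · intro v vis hf _ _ _
      exact absurd hf (Nat.not_lt_zero _)
    · intro v ns vis cnt hf _ _ _
      exact absurd hf (Nat.not_lt_zero _)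
  | succ fuel ih =>
    obtain ⟨ihv, ihl⟩ := ih
    have hvisit : ∀ (v : Int) (vis : PySem.Set Int),
        ((graph.map Prod.fst).filter (fun k => !vis.contains k)).length < fuel + 1 →
        vis.Nodup → (∀ x ∈ vis, pvReach graph v1 v2 x) → pvReach graph v1 v2 v →
        pvGrow graph v1 v2 vis (dfsVisit graph v1 v2 (fuel + 1) v vis).1 ∧
        v ∈ (dfsVisit graph v1 v2 (fuel + 1) v vis).1 ∧
        (dfsVisit graph v1 v2 (fuel + 1) v vis).2
          = ((dfsVisit graph v1 v2 (fuel + 1) v vis).1.length : Int) - (vis.length : Int) := by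
      intro v vis hf hnd hvisR hv
      by_cases hm : v ∈ vis
      · have heq : dfsVisit graph v1 v2 (fuel + 1) v vis = (vis, 0) := by
          rw [dfsVisit]
          simp [List.contains_eq_mem, hm]
        rw [heq]
        exact ⟨⟨fun x hx => hx, hvisR, fun x hx hnx => absurd hx hnx, hnd⟩, hm, by simp⟩
      · have hkey : v ∈ graph.map Prod.fst := pvReachKeys graph v1 v2 hpre v hv
        obtain ⟨ns, hns⟩ := pvMemKeysGet graph v hkey
        have heq : dfsVisit graph v1 v2 (fuel + 1) v vis
            = dfsList graph v1 v2 fuel v ns (PySem.Set.add vis v) 1 := by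
          rw [dfsVisit]
          rw [if_neg (by simp [List.contains_eq_mem, hm]), hns]
        have hlt : ((graph.map Prod.fst).filter (fun k => !(PySem.Set.add vis v).contains k)).length
            < ((graph.map Prod.fst).filter (fun k => !vis.contains k)).length := by
          rw [PySem.Set.add_of_not_mem hm]
          exact pvFilterLt _ _ _ hkey hm
        have hf' : ((graph.map Prod.fst).filter
            (fun k => !(PySem.Set.add vis v).contains k)).length < fuel := by omega
        have hvisR' : ∀ x ∈ PySem.Set.add vis v, pvReach graph v1 v2 x := by
          intro x hx
          rcases (PySem.Set.mem_add _ _ _).mp hx with h | rfl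
          · exact hvisR x h
          · exact hv
        have hnsR : ∀ w ∈ ns, (v ≠ v1 ∨ w ≠ v2) → pvReach graph v1 v2 w :=
          fun w hw hg => hv.tail ((pvMemSuccIff graph v1 v2 v ns hns w).mpr ⟨hw, hg⟩)
        obtain ⟨⟨g1, g2, g3, g4⟩, g5, g6⟩ :=
          ihl v ns (PySem.Set.add vis v) 1 hf' (PySem.Set.nodup_add vis v hnd) hvisR' hnsR
        rw [heq]
        refine ⟨⟨fun x hx => g1 x ((PySem.Set.mem_add _ _ _).mpr (Or.inl hx)), g2, ?_, g4⟩,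
          g1 v ((PySem.Set.mem_add _ _ _).mpr (Or.inr rfl)), ?_⟩
        · intro x hx hnx w hw
          by_cases hxv : x = v
          · subst hxv
            obtain ⟨hw1, hw2⟩ := (pvMemSuccIff graph v1 v2 x ns hns w).mp hw
            exact g5 w hw1 hw2
          · refine g3 x hx ?_ w hw
            intro hmem
            rcases (PySem.Set.mem_add _ _ _).mp hmem with h | h
            · exact hnx h
            · exact hxv h
        · have hlen : (PySem.Set.add vis v).length = vis.length + 1 := by
            rw [PySem.Set.add_of_not_mem hm]
            simp
          rw [g6, hlen]
          push_cast
          ring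
    refine ⟨hvisit, ?_⟩
    intro v ns
    induction ns with
    | nil =>
      intro vis cnt hf hnd hvisR hnsR
      have heq : dfsList graph v1 v2 (fuel + 1) v [] vis cnt = (vis, cnt) := by
        rw [dfsList]
      rw [heq]
      exact ⟨⟨fun x hx => hx, hvisR, fun x hx hnx => absurd hx hnx, hnd⟩, by simp, by simp⟩
    | cons w ws ihw =>
      intro vis cnt hf hnd hvisR hnsR
      by_cases hg : v ≠ v1 ∨ w ≠ v2
      · have heq : dfsList graph v1 v2 (fuel + 1) v (w :: ws) vis cnt
            = dfsList graph v1 v2 (fuel + 1) v ws (dfsVisit graph v1 v2 (fuel + 1) w vis).1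
                (cnt + (dfsVisit graph v1 v2 (fuel + 1) w vis).2) := by
          rw [dfsList]
          rw [if_pos hg]
        obtain ⟨⟨a1, a2, a3, a4⟩, a5, a6⟩ :=
          hvisit w vis hf hnd hvisR (hnsR w List.mem_cons_self hg)
        have hf2 : ((graph.map Prod.fst).filter
            (fun k => !(dfsVisit graph v1 v2 (fuel + 1) w vis).1.contains k)).length < fuel + 1 :=
          Nat.lt_of_le_of_lt (pvFilterLe _ _ _ a1) hf
        obtain ⟨⟨b1, b2, b3, b4⟩, b5, b6⟩ :=
          ihw (dfsVisit graph v1 v2 (fuel + 1) w vis).1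
            (cnt + (dfsVisit graph v1 v2 (fuel + 1) w vis).2) hf2 a4 a2
            (fun w' hw' hg' => hnsR w' (List.mem_cons_of_mem _ hw') hg')
        rw [heq]
        refine ⟨⟨fun x hx => b1 x (a1 x hx), b2, ?_, b4⟩, ?_, ?_⟩
        · intro x hx hnx w' hw'
          by_cases hxr : x ∈ (dfsVisit graph v1 v2 (fuel + 1) w vis).1
          · exact b1 w' (a3 x hxr hnx w' hw')
          · exact b3 x hx hxr w' hw'
        · intro w' hw' hg'
          rcases List.mem_cons.mp hw' with rfl | h
          · exact b1 w' a5
          · exact b5 w' h hg'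
        · rw [b6, a6]
          ring
      · have heq : dfsList graph v1 v2 (fuel + 1) v (w :: ws) vis cnt
            = dfsList graph v1 v2 (fuel + 1) v ws vis cnt := by
          rw [dfsList]
          rw [if_neg hg]
        obtain ⟨bg, b5, b6⟩ :=
          ihw vis cnt hf hnd hvisR (fun w' hw' hg' => hnsR w' (List.mem_cons_of_mem _ hw') hg')
        rw [heq]
        refine ⟨bg, ?_, b6⟩
        intro w' hw' hg'
        rcases List.mem_cons.mp hw' with rfl | h
        · exact absurd hg' hg
        · exact b5 w' h hg'

-- ===== VERDICT (by name: the statement is the Claim_ definition above) =====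
theorem bfs_spec : Claim_equal_bfs := by
  intro graph v1 v2 hdom hpre
  unfold Spec_bfs bfs bfs_alt
  obtain ⟨Vb, hb, hbnd, hbmem⟩ := bfsLoop_reach graph v1 v2 hpre [v1] PySem.Set.empty 0
    (by simp [PySem.Set.empty])
    (by intro x hx; simp at hx; subst hx; exact Relation.ReflTransGen.refl)
    (by simp [PySem.Set.empty])
    (by simp [PySem.Set.empty])
    (by simp)
    (by simp [PySem.Set.empty])
  have hfuel : ((graph.map Prod.fst).filter
      (fun k => !(PySem.Set.empty : PySem.Set Int).contains k)).length < graph.length + 2 := by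
    calc ((graph.map Prod.fst).filter (fun k => !(PySem.Set.empty : PySem.Set Int).contains k)).length
        ≤ (graph.map Prod.fst).length := List.length_filter_le _ _
      _ = graph.length := by simp
      _ < graph.length + 2 := by omega
  obtain ⟨⟨hmono, hreach, hclosed, hnd⟩, hvmem, hcnt⟩ :=
    (dfs_spec graph v1 v2 hpre (graph.length + 2)).1 v1 PySem.Set.empty hfuel
      (by simp [PySem.Set.empty]) (by simp [PySem.Set.empty]) Relation.ReflTransGen.refl
  have hmemiff : ∀ x, x ∈ (dfsVisit graph v1 v2 (graph.length + 2) v1 PySem.Set.empty).1 ↔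
      pvReach graph v1 v2 x := by
    intro x
    constructor
    · exact hreach x
    · exact pvReachClosed graph v1 v2 _ hvmem
        (fun y hy w hw => hclosed y hy (by simp [PySem.Set.empty]) w hw) x
  rw [hb, hcnt]
  have hlen : Vb.length = (dfsVisit graph v1 v2 (graph.length + 2) v1 PySem.Set.empty).1.length :=
    pvLenEq _ _ hbnd hnd (fun x => (hbmem x).trans (hmemiff x).symm)
  simp [PySem.Set.empty, hlen]
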